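-- pv_equiv track=rewrite | github.com/Askinkaty/GramCorr | evaluation/eval_new.py | collect_lines
-- ===== SOURCE A (Python) =====
-- def collect_lines(source, target, number):
--     s_lines = []
--     t_lines = []
--     z = zip(source, target)
--     full_s_line = []
--     full_t_line = []
--     for i, pair in enumerate(z):
--         s_line = pair[0]
--         t_line = pair[1]
--         if '# # #' in s_line:
--             s_lines.append((number, full_s_line))
--             t_lines.append((number, full_t_line))
--             full_s_line = []
--             full_t_line = []
--             continue
--         else:
--
--             full_s_line.append(s_line)
--             full_t_line.append(t_line)
--     return s_lines, t_lines
-- ===== SOURCE B (Python) =====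
-- def collect_lines(source, target, number):
--     # Split the zipped pairs on delimiter lines instead of accumulating element by element.
--     pairs = list(zip(source, target))
--     s_lines, t_lines = [], []
--     while True:
--         i = next((k for k, p in enumerate(pairs) if '# # #' in p[0]), None)
--         if i is None:
--             return s_lines, t_lines
--         seg = pairs[:i]
--         s_lines.append((number, [p[0] for p in seg]))
--         t_lines.append((number, [p[1] for p in seg]))
--         pairs = pairs[i + 1:]
-- ===== Notes on version B (the rewrite author's own statement) =====
-- stated objective: alternative
-- what changed: Instead of a single element-by-element loop carrying running segment accumulators, B repeatedly finds the next delimiter index in the zipped pair list, slices the whole segment before it, unzips it into the two columns, and continues on the remainder after the delimiter.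
import Mathlib
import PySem

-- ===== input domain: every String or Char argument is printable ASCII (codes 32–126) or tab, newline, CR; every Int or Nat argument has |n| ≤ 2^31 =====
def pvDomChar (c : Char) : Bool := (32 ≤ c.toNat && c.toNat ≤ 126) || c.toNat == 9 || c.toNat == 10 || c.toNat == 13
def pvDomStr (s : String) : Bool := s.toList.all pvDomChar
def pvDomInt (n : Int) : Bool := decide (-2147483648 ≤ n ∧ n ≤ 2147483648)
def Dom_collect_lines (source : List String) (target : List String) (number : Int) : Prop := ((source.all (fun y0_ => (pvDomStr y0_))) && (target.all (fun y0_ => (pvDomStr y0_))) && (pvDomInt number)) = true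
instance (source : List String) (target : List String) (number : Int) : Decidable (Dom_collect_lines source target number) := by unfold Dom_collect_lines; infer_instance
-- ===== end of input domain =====

-- B splits the zipped pairs at delimiter indices (find-next-delimiter / slice / recurse)
-- instead of A's single accumulator-carrying loop; alternative decomposition, same cost.


-- ===== PORT A =====
-- '# # #' in s_line
def pvDelim (s : String) : Bool := PySem.Str.isIn "# # #" s

-- A's loop state: (s_lines, t_lines, full_s_line, full_t_line)
def pvAStep (number : Int)
    (st : List (Int × List String) × List (Int × List String) × List String × List String)
    (pair : String × String) :
    List (Int × List String) × List (Int × List String) × List String × List String :=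
  let (s_lines, t_lines, full_s, full_t) := st
  if pvDelim pair.1 then
    (s_lines ++ [(number, full_s)], t_lines ++ [(number, full_t)], [], [])
  else
    (s_lines, t_lines, full_s ++ [pair.1], full_t ++ [pair.2])

def collect_lines (source : List String) (target : List String) (number : Int) : (List (Int × List String)) × (List (Int × List String)) :=
  let z := List.zip source target
  let res := z.foldl (pvAStep number) ([], [], [], [])
  (res.1, res.2.1)

-- ===== PORT B =====
-- B's while loop: find next delimiter index, slice the segment before it, recurse on the rest.
def pvBLoop (number : Int) (pairs : List (String × String))
    (s_lines t_lines : List (Int × List String)) :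
    (List (Int × List String)) × (List (Int × List String)) :=
  match h : pairs.findIdx? (fun p => pvDelim p.1) with
  | none => (s_lines, t_lines)
  | some i =>
    let seg := pairs.take i
    pvBLoop number (pairs.drop (i + 1))
      (s_lines ++ [(number, seg.map Prod.fst)])
      (t_lines ++ [(number, seg.map Prod.snd)])
termination_by pairs.length
decreasing_by
  have : i < pairs.length := (List.findIdx?_eq_some_iff_findIdx_eq.mp h).1
  simp [List.length_drop]; omega

def collect_lines_alt (source : List String) (target : List String) (number : Int) : (List (Int × List String)) × (List (Int × List String)) :=
  pvBLoop number (List.zip source target) [] []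

-- ===== PRECONDITION & SPEC =====
def Spec_collect_lines (source : List String) (target : List String) (number : Int) (out : (List (Int × List String)) × (List (Int × List String))) : Prop := out = collect_lines_alt source target number
instance (source : List String) (target : List String) (number : Int) (out : (List (Int × List String)) × (List (Int × List String))) : Decidable (Spec_collect_lines source target number out) := by unfold Spec_collect_lines; infer_instance

-- ===== CLAIM (what is proved, stated in full; the proofs are below) =====
def Claim_equal_collect_lines : Prop := ∀ (source : List String) (target : List String) (number : Int), Dom_collect_lines source target number → Spec_collect_lines source target number (collect_lines source target number)

-- ===== LEMMAS AND PROOFS =====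

-- Unfolding equation for pvBLoop (its definition matches on `h :`, so state it once).
theorem pvBLoop_eq (number : Int) (pairs : List (String × String))
    (sl tl : List (Int × List String)) :
    pvBLoop number pairs sl tl =
    match pairs.findIdx? (fun p => pvDelim p.1) with
    | none => (sl, tl)
    | some i =>
        pvBLoop number (pairs.drop (i + 1))
          (sl ++ [(number, (pairs.take i).map Prod.fst)])
          (tl ++ [(number, (pairs.take i).map Prod.snd)]) := by
  rw [pvBLoop.eq_def]
  cases h : pairs.findIdx? (fun p => pvDelim p.1) <;> simp only [h]

-- Bridge: A's fold from an arbitrary state equals B's loop after flushing the pending segment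
-- at the first delimiter (or stopping if there is none).
theorem pvFold_eq_loop (number : Int) :
    ∀ (pairs : List (String × String)) (sl tl : List (Int × List String))
      (fs ft : List String),
      (fun r => (r.1, r.2.1)) (pairs.foldl (pvAStep number) (sl, tl, fs, ft)) =
      match pairs.findIdx? (fun p => pvDelim p.1) with
      | none => (sl, tl)
      | some i =>
          pvBLoop number (pairs.drop (i + 1))
            (sl ++ [(number, fs ++ (pairs.take i).map Prod.fst)])
            (tl ++ [(number, ft ++ (pairs.take i).map Prod.snd)]) := by
  intro pairs
  induction pairs with
  | nil => intro sl tl fs ft; simp [List.findIdx?_nil]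
  | cons p rest ih =>
    intro sl tl fs ft
    by_cases hd : pvDelim p.1
    · rw [List.foldl_cons]
      have hstep : pvAStep number (sl, tl, fs, ft) p
          = (sl ++ [(number, fs)], tl ++ [(number, ft)], [], []) := by
        simp [pvAStep, hd]
      rw [hstep, ih]
      rw [List.findIdx?_cons]
      simp only [hd, if_true]
      rw [pvBLoop_eq]
      cases hrest : rest.findIdx? (fun p => pvDelim p.1) with
      | none => simp [hrest]
      | some i => simp [hrest, List.append_assoc]
    · rw [List.foldl_cons]
      have hstep : pvAStep number (sl, tl, fs, ft) p
          = (sl, tl, fs ++ [p.1], ft ++ [p.2]) := by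
        simp [pvAStep, hd]
      rw [hstep, ih]
      rw [List.findIdx?_cons]
      rw [Bool.not_eq_true] at hd
      rw [hd]
      cases hrest : rest.findIdx? (fun p => pvDelim p.1) with
      | none => simp
      | some i => simp [List.append_assoc]

-- ===== VERDICT (by name: the statement is the Claim_ definition above) =====
theorem collect_lines_spec : Claim_equal_collect_lines := by
  intro source target number _
  unfold Spec_collect_lines collect_lines collect_lines_alt
  have h := pvFold_eq_loop number (List.zip source target) [] [] [] []
  simp only [List.nil_append] at h
  rw [pvBLoop_eq]
  exact h
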